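-- pv_equiv track=rewrite | github.com/suryowedossusilo-netizen/Praktikum_BAB_6 | Tugas/Tugas_2.py | elemen_batas
-- ===== SOURCE A (Python) =====
-- def elemen_batas(arr):
--     n = len(arr)
--
--     left_max = [0] * n
--     right_min = [0] * n
--
--     left_max[0] = arr[0]
--     for i in range(1, n):
--         left_max[i] = max(left_max[i - 1], arr[i])
--
--     right_min[n - 1] = arr[n - 1]
--     for i in range(n - 2, -1, -1):
--         right_min[i] = min(right_min[i + 1], arr[i])
--
--     for i in range(n):
--         if arr[i] == left_max[i] and arr[i] == right_min[i]:
--             return arr[i], i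
--
--     return -1, -1
-- ===== SOURCE B (Python) =====
-- def elemen_batas(arr):
--     # Direct check from the definition: the first element that is >= everything
--     # before it and <= everything after it. No auxiliary prefix/suffix arrays.
--     for i, x in enumerate(arr):
--         if all(y <= x for y in arr[:i]) and all(x <= y for y in arr[i + 1:]):
--             return x, i
--     return -1, -1
-- ===== Notes on version B (the rewrite author's own statement) =====
-- stated objective: simpler
-- what changed: B drops A's two precomputed prefix-max/suffix-min arrays entirely and checks the defining property directly: for each index it compares the element against its whole prefix and suffix, returning at the first hit.
import Mathlib
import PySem

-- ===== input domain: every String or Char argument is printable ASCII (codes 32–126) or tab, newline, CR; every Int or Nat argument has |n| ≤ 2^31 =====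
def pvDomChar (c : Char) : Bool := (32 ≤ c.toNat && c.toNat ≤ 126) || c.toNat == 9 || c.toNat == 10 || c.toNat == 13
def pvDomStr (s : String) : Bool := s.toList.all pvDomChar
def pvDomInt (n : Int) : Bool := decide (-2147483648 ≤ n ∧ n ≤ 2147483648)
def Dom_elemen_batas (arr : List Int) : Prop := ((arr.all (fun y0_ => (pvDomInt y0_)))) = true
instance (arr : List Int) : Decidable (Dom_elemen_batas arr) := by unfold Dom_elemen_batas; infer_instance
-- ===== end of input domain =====

-- B checks the defining property of each index directly against its whole prefix and suffix,
-- with no auxiliary prefix-max/suffix-min arrays (objective: simpler; O(n^2) instead of O(n)).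
-- ===== PORT A =====
def elemen_batas (arr : List Int) : Int × Int :=
  let n : Int := arr.length
  let leftMax : List Int :=
    (PySem.List.pyRange 1 n 1).foldl
      (fun lm i => lm ++ [max (PySem.List.pyGetD lm (i - 1) 0) (PySem.List.pyGetD arr i 0)])
      [PySem.List.pyGetD arr 0 0]
  let rightMin : List Int :=
    (PySem.List.pyRange (n - 2) (-1) (-1)).foldl
      (fun rm i => min (PySem.List.pyGetD rm 0 0) (PySem.List.pyGetD arr i 0) :: rm)
      [PySem.List.pyGetD arr (n - 1) 0]
  match (PySem.List.pyRange 0 n 1).findSome? (fun i =>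
      if PySem.List.pyGetD arr i 0 = PySem.List.pyGetD leftMax i 0 ∧
         PySem.List.pyGetD arr i 0 = PySem.List.pyGetD rightMin i 0 then
        some (PySem.List.pyGetD arr i 0, i)
      else none) with
  | some r => r
  | none => (-1, -1)

-- ===== PORT B =====
def elemen_batas_alt (arr : List Int) : Int × Int :=
  match (PySem.List.enumerate arr).findSome? (fun p =>
      if (PySem.List.slice arr none (some p.1)).all (fun y => decide (y ≤ p.2)) &&
         (PySem.List.slice arr (some (p.1 + 1)) none).all (fun y => decide (p.2 ≤ y)) then
        some (p.2, p.1)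
      else none) with
  | some r => r
  | none => (-1, -1)

-- ===== PRECONDITION & SPEC =====
-- Pre_ excludes exactly the empty list, on which the Python A raises IndexError (arr[0]).
def Pre_elemen_batas (arr : List Int) : Prop := arr ≠ []
instance (arr : List Int) : Decidable (Pre_elemen_batas arr) := by unfold Pre_elemen_batas; infer_instance
def pvWitness_elemen_batas : List Int := [3, 1, 4]
def Spec_elemen_batas (arr : List Int) (out : Int × Int) : Prop := out = elemen_batas_alt arr
instance (arr : List Int) (out : Int × Int) : Decidable (Spec_elemen_batas arr out) := by unfold Spec_elemen_batas; infer_instance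

-- ===== CLAIM (what is proved, stated in full; the proofs are below) =====
def Claim_equal_elemen_batas : Prop := ∀ (arr : List Int), Dom_elemen_batas arr → Pre_elemen_batas arr → Spec_elemen_batas arr (elemen_batas arr)

-- ===== LEMMAS AND PROOFS =====

-- proof-only helpers: the prefix maximum over arr[0..k] and the suffix minimum over arr[k..]
def pmaxAt (arr : List Int) (k : Nat) : Int := ((arr.take (k + 1)).max?).getD 0
def sminAt (arr : List Int) (k : Nat) : Int := ((arr.drop k).min?).getD 0

theorem findSome?_congr_mem {α β : Type} (f g : α → Option β) (l : List α)
    (h : ∀ x ∈ l, f x = g x) : l.findSome? f = l.findSome? g := by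
  induction l with
  | nil => rfl
  | cons a t ih =>
    simp only [List.findSome?_cons, h a (by simp)]
    cases g a with
    | none => exact ih (fun x hx => h x (by simp [hx]))
    | some b => rfl

theorem max?_nonempty {l : List Int} (hne : l ≠ []) : ∃ M, l.max? = some M := by
  cases hm : l.max? with
  | none => exact absurd (List.max?_eq_none_iff.mp hm) hne
  | some M => exact ⟨M, rfl⟩

theorem min?_nonempty {l : List Int} (hne : l ≠ []) : ∃ M, l.min? = some M := by
  cases hm : l.min? with
  | none => exact absurd (List.min?_eq_none_iff.mp hm) hne
  | some M => exact ⟨M, rfl⟩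

theorem take_ne_nil (arr : List Int) (m : Nat) (h0 : 0 < m) (h : m ≤ arr.length) :
    arr.take m ≠ [] := by
  intro e
  have : (arr.take m).length = m := by simp; omega
  rw [e] at this; simp at this; omega

theorem pmaxAt_succ (arr : List Int) (m : Nat) (h0 : 0 < m) (h : m < arr.length) :
    pmaxAt arr m = max (pmaxAt arr (m - 1)) (arr.getD m 0) := by
  have hm : m - 1 + 1 = m := by omega
  have ht : arr.take (m + 1) = arr.take m ++ [arr[m]] := List.take_succ_eq_append_getElem h
  obtain ⟨M, hM⟩ := max?_nonempty (take_ne_nil arr m h0 (le_of_lt h))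
  obtain ⟨hMmem, hMub⟩ := List.max?_eq_some_iff.mp hM
  have hres : (arr.take (m + 1)).max? = some (max M arr[m]) := by
    have hL : (arr.take m ++ [arr[m]]).max? = some (max M arr[m]) := by
      apply List.max?_eq_some_iff.mpr
      refine ⟨?_, ?_⟩
      · rcases max_choice M arr[m] with h1 | h1 <;> rw [h1]
        · exact List.mem_append_left _ hMmem
        · exact List.mem_append_right _ (by simp)
      · intro b hb
        rcases List.mem_append.mp hb with hb | hb
        · exact le_trans (hMub b hb) (le_max_left _ _)
        · simp at hb; rw [hb]; exact le_max_right _ _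
    rw [ht, hL]
  unfold pmaxAt
  rw [hres, hm, hM, List.getD_eq_getElem arr 0 h]
  rfl

theorem sminAt_pred (arr : List Int) (j : Nat) (h : j + 1 < arr.length) :
    sminAt arr j = min (sminAt arr (j + 1)) (arr.getD j 0) := by
  have hd : arr.drop j = arr[j] :: arr.drop (j + 1) := List.drop_eq_getElem_cons (by omega)
  have hne : arr.drop (j + 1) ≠ [] := by
    intro e
    have : (arr.drop (j + 1)).length = arr.length - (j + 1) := by simp
    rw [e] at this; simp at this; omega
  obtain ⟨S, hS⟩ := min?_nonempty hne
  unfold sminAt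
  rw [hd, List.min?_cons, hS, List.getD_eq_getElem arr 0 (by omega : j < arr.length)]
  simp [min_comm]

theorem pmaxAt_zero (arr : List Int) (h : arr ≠ []) : pmaxAt arr 0 = arr.getD 0 0 := by
  cases arr with
  | nil => exact absurd rfl h
  | cons a t => simp [pmaxAt]

theorem sminAt_last (arr : List Int) (h : arr ≠ []) :
    sminAt arr (arr.length - 1) = arr.getD (arr.length - 1) 0 := by
  have hlen : 0 < arr.length := List.length_pos_iff.mpr h
  have hd : arr.drop (arr.length - 1) = arr[arr.length - 1] :: arr.drop (arr.length - 1 + 1) :=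
    List.drop_eq_getElem_cons (by omega)
  have hd2 : arr.drop (arr.length - 1 + 1) = [] := by
    apply List.drop_eq_nil_of_le; omega
  rw [sminAt, hd, hd2, List.getD_eq_getElem arr 0 (by omega)]
  rfl

theorem lm_inv (arr : List Int) (h : arr ≠ []) :
    ∀ m : Nat, 1 ≤ m → m ≤ arr.length →
    (PySem.List.pyRange 1 (m : Int) 1).foldl
      (fun lm i => lm ++ [max (PySem.List.pyGetD lm (i - 1) 0) (PySem.List.pyGetD arr i 0)])
      [PySem.List.pyGetD arr 0 0]
    = (List.range m).map (pmaxAt arr) := by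
  intro m
  induction m with
  | zero => intro h1 _; omega
  | succ m ih =>
    intro _ h2
    by_cases hm : m = 0
    · subst hm
      rw [PySem.List.pyRange_one_eq_nil (by norm_num)]
      simp [PySem.List.pyGetD_ofNat', pmaxAt_zero arr h]
    · have h1m : 1 ≤ m := by omega
      have hcast : ((m + 1 : Nat) : Int) = (m : Int) + 1 := by push_cast; ring
      rw [hcast, PySem.List.pyRange_one_succ_right (by exact_mod_cast h1m),
          List.foldl_append, ih h1m (by omega)]
      simp only [List.foldl_cons, List.foldl_nil]
      rw [List.range_succ, List.map_append]
      congr 1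
      have hc2 : ((m : Int) - 1) = ((m - 1 : Nat) : Int) := by omega
      rw [hc2, PySem.List.pyGetD_natCast, PySem.List.pyGetD_natCast,
          PySem.List.getD_map_range _ _ _ _ (by omega : m - 1 < m)]
      simp [pmaxAt_succ arr m (by omega) (by omega)]

theorem lm_eq (arr : List Int) (h : arr ≠ []) :
    (PySem.List.pyRange 1 (arr.length : Int) 1).foldl
      (fun lm i => lm ++ [max (PySem.List.pyGetD lm (i - 1) 0) (PySem.List.pyGetD arr i 0)])
      [PySem.List.pyGetD arr 0 0]
    = (List.range arr.length).map (pmaxAt arr) := by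
  exact lm_inv arr h arr.length (List.length_pos_iff.mpr h) (le_refl _)

theorem rm_inv (arr : List Int) (h : arr ≠ []) :
    ∀ j : Nat, j ≤ arr.length - 1 →
    (PySem.List.pyRange ((j : Int) - 1) (-1) (-1)).foldl
      (fun rm i => min (PySem.List.pyGetD rm 0 0) (PySem.List.pyGetD arr i 0) :: rm)
      ((List.range' j (arr.length - j)).map (sminAt arr))
    = (List.range' 0 arr.length).map (sminAt arr) := by
  have hlen : 0 < arr.length := List.length_pos_iff.mpr h
  intro j
  induction j with
  | zero =>
    intro _
    rw [PySem.List.pyRange_neg_one_eq_nil (by norm_num)]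
    simp
  | succ j ih =>
    intro hj
    have hc : ((j + 1 : Nat) : Int) - 1 = (j : Int) := by push_cast; ring
    rw [hc, PySem.List.pyRange_neg_one_cons (by omega)]
    simp only [List.foldl_cons]
    have hr : arr.length - (j + 1) = (arr.length - (j + 2)) + 1 := by omega
    have hacc : (List.range' (j + 1) (arr.length - (j + 1))).map (sminAt arr)
        = sminAt arr (j + 1) :: (List.range' (j + 2) (arr.length - (j + 2))).map (sminAt arr) := by
      rw [hr, List.range'_succ]; rfl
    have hhead : PySem.List.pyGetD ((List.range' (j + 1) (arr.length - (j + 1))).map (sminAt arr)) 0 0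
        = sminAt arr (j + 1) := by
      rw [hacc, PySem.List.pyGetD_ofNat']; rfl
    rw [hhead, PySem.List.pyGetD_natCast,
        ← sminAt_pred arr j (by omega)]
    have hacc2 : sminAt arr j :: (List.range' (j + 1) (arr.length - (j + 1))).map (sminAt arr)
        = (List.range' j (arr.length - j)).map (sminAt arr) := by
      rw [show arr.length - j = (arr.length - (j + 1)) + 1 by omega, List.range'_succ]; rfl
    rw [hacc2]
    exact ih (by omega)

theorem rm_eq (arr : List Int) (h : arr ≠ []) :
    (PySem.List.pyRange ((arr.length : Int) - 2) (-1) (-1)).foldl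
      (fun rm i => min (PySem.List.pyGetD rm 0 0) (PySem.List.pyGetD arr i 0) :: rm)
      [PySem.List.pyGetD arr ((arr.length : Int) - 1) 0]
    = (List.range arr.length).map (sminAt arr) := by
  have hlen : 0 < arr.length := List.length_pos_iff.mpr h
  have h1 : ((arr.length : Int) - 1) = ((arr.length - 1 : Nat) : Int) := by omega
  have h2 : ((arr.length : Int) - 2) = ((arr.length - 1 : Nat) : Int) - 1 := by omega
  have hinit : [PySem.List.pyGetD arr ((arr.length : Int) - 1) 0]
      = (List.range' (arr.length - 1) (arr.length - (arr.length - 1))).map (sminAt arr) := by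
    rw [h1, PySem.List.pyGetD_natCast,
        show arr.length - (arr.length - 1) = 1 by omega]
    simp [sminAt_last arr h]
  rw [hinit, h2, rm_inv arr h (arr.length - 1) (le_refl _), List.range_eq_range']

theorem pmax_cond (arr : List Int) (k : Nat) (h : k < arr.length) :
    (arr.getD k 0 = pmaxAt arr k) ↔ ((arr.take k).all (fun y => decide (y ≤ arr.getD k 0)) = true) := by
  have ht : arr.take (k + 1) = arr.take k ++ [arr[k]] := List.take_succ_eq_append_getElem h
  have hx : arr.getD k 0 = arr[k] := List.getD_eq_getElem arr 0 h
  simp only [List.all_eq_true, decide_eq_true_eq]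
  constructor
  · intro he y hy
    obtain ⟨M, hM⟩ := max?_nonempty (take_ne_nil arr (k + 1) (by omega) (by omega))
    obtain ⟨_, hMub⟩ := List.max?_eq_some_iff.mp hM
    have : arr.getD k 0 = M := by rw [he, pmaxAt, hM]; rfl
    rw [this]
    exact hMub y (by rw [ht]; exact List.mem_append_left _ hy)
  · intro hall
    have : (arr.take (k + 1)).max? = some arr[k] := by
      apply List.max?_eq_some_iff.mpr
      refine ⟨by rw [ht]; exact List.mem_append_right _ (by simp), ?_⟩
      intro b hb
      rw [ht] at hb
      rcases List.mem_append.mp hb with hb | hb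
      · rw [← hx]; exact hall b hb
      · simp at hb; omega
    rw [pmaxAt, this, hx]; rfl

theorem smin_cond (arr : List Int) (k : Nat) (h : k < arr.length) :
    (arr.getD k 0 = sminAt arr k) ↔ ((arr.drop (k + 1)).all (fun y => decide (arr.getD k 0 ≤ y)) = true) := by
  have hd : arr.drop k = arr[k] :: arr.drop (k + 1) := List.drop_eq_getElem_cons h
  have hx : arr.getD k 0 = arr[k] := List.getD_eq_getElem arr 0 h
  simp only [List.all_eq_true, decide_eq_true_eq]
  constructor
  · intro he y hy
    obtain ⟨S, hS⟩ := min?_nonempty (show arr.drop k ≠ [] by rw [hd]; exact List.cons_ne_nil _ _)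
    obtain ⟨_, hSlb⟩ := List.min?_eq_some_iff.mp hS
    have : arr.getD k 0 = S := by rw [he, sminAt, hS]; rfl
    rw [this]
    exact hSlb y (by rw [hd]; exact List.mem_cons_of_mem _ hy)
  · intro hall
    have : (arr.drop k).min? = some arr[k] := by
      apply List.min?_eq_some_iff.mpr
      refine ⟨by rw [hd]; exact List.mem_cons_self, ?_⟩
      intro b hb
      rw [hd] at hb
      rcases List.mem_cons.mp hb with hb | hb
      · omega
      · rw [← hx]; exact hall b hb
    rw [sminAt, this, hx]; rfl

-- ===== VERDICT (by name: the statement is the Claim_ definition above) =====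
theorem elemen_batas_spec : Claim_equal_elemen_batas := by
  intro arr _ hne
  unfold Spec_elemen_batas elemen_batas elemen_batas_alt
  dsimp only
  rw [lm_eq arr hne, rm_eq arr hne]
  rw [PySem.List.enumerate_eq_map_pyRange arr 0, List.findSome?_map]
  simp only [PySem.List.len_eq]
  rw [findSome?_congr_mem]
  intro i hi
  rw [PySem.List.mem_pyRange_one] at hi
  obtain ⟨k, rfl⟩ : ∃ k : Nat, i = (k : Int) := ⟨i.toNat, (Int.toNat_of_nonneg hi.1).symm⟩
  have hk : k < arr.length := by exact_mod_cast hi.2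
  simp only [Function.comp]
  simp only [PySem.List.pyGetD_natCast, PySem.List.getD_map_range _ _ _ _ hk, PySem.List.slice_to_natCast]
  have h1 : ((k : Int) + 1) = ((k + 1 : Nat) : Int) := by push_cast; ring
  rw [h1, PySem.List.slice_from_natCast]
  by_cases hA : arr.getD k 0 = pmaxAt arr k ∧ arr.getD k 0 = sminAt arr k
  · rw [if_pos hA, if_pos]
    rw [(pmax_cond arr k hk).mp hA.1, (smin_cond arr k hk).mp hA.2]; rfl
  · rw [if_neg hA, if_neg]
    intro hc
    apply hA
    rw [Bool.and_eq_true] at hc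
    exact ⟨(pmax_cond arr k hk).mpr hc.1, (smin_cond arr k hk).mpr hc.2⟩
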